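-- pv_equiv track=rewrite | github.com/Merlness/AoC | 2015/day_3.py | robo_santa_coordinates
-- ===== SOURCE A (Python) =====
-- def robo_santa_coordinates(directions):
--     x = 0
--     y = 0
--     a = 0
--     b = 0
--
--     coordinates = [(x,y)]
--     temp1 = []
--     temp2 = []
--
--     for i in range(len(directions)):
--         if i % 2 ==0:
--             temp1.append(directions[i])
--         else:
--             temp2.append(directions[i])
--
--     for moves in temp1:
--         if moves == '^':
--             y += 1
--             coordinates.append((x,y))
--         elif moves == 'v':
--             y -= 1
--             coordinates.append((x,y))
--         elif moves == '>':
--             x += 1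
--             coordinates.append((x,y))
--         elif moves == '<':
--             x -= 1
--             coordinates.append((x,y))
--
--     for moves in temp2:
--         if moves == '^':
--             b += 1
--             coordinates.append((a,b))
--         elif moves == 'v':
--             b -= 1
--             coordinates.append((a,b))
--         elif moves == '>':
--             a += 1
--             coordinates.append((a,b))
--         elif moves == '<':
--             a -= 1
--             coordinates.append((a,b))
--
--     return set(coordinates)
-- ===== SOURCE B (Python) =====
-- def robo_santa_coordinates(directions):
--     deltas = {'^': (0, 1), 'v': (0, -1), '>': (1, 0), '<': (-1, 0)}
--     pos = [(0, 0), (0, 0)]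
--     visits = [[], []]
--     for i, move in enumerate(directions):
--         if move in deltas:
--             dx, dy = deltas[move]
--             x, y = pos[i % 2]
--             pos[i % 2] = (x + dx, y + dy)
--             visits[i % 2].append(pos[i % 2])
--     return set([(0, 0)] + visits[0] + visits[1])
-- ===== Notes on version B (the rewrite author's own statement) =====
-- stated objective: simpler
-- what changed: Replaces A's index-parity pre-split loop plus two duplicated if/elif move loops with a single pass over enumerate(directions) using a direction->delta table and parity-indexed mover positions/visit lists.
import Mathlib
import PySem

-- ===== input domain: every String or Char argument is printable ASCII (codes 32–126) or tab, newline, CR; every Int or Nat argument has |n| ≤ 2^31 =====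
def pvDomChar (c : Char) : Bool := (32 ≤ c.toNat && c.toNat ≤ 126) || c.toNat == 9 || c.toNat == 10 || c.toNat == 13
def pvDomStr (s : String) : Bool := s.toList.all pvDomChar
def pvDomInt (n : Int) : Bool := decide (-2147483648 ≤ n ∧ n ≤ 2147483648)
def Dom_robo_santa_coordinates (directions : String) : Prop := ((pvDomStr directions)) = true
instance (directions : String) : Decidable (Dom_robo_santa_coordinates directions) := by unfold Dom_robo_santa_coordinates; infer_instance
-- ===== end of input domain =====

-- B replaces A's pre-split loop plus two duplicated if/elif move loops by one pass over
-- enumerate(directions) with a delta table and parity-indexed mover state (objective: simpler).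

-- ===== PORT A =====
-- loop bodies of A's three for-loops, named so the proofs can speak about them
def pvA_splitBody (directions : String) (t : List Char × List Char) (i : Int) : List Char × List Char :=
  if PySem.Int.mod i 2 == 0 then (t.1 ++ [(PySem.Str.pyGet? directions i).getD ' '], t.2)
  else (t.1, t.2 ++ [(PySem.Str.pyGet? directions i).getD ' '])

def pvA_moveBody1 (s : Int × Int × List (Int × Int)) (moves : Char) : Int × Int × List (Int × Int) :=
  let (x, y, coordinates) := s
  if moves = '^' then (x, y + 1, coordinates ++ [(x, y + 1)])
  else if moves = 'v' then (x, y - 1, coordinates ++ [(x, y - 1)])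
  else if moves = '>' then (x + 1, y, coordinates ++ [(x + 1, y)])
  else if moves = '<' then (x - 1, y, coordinates ++ [(x - 1, y)])
  else (x, y, coordinates)

-- A's third loop is a verbatim copy of its second (variables a, b instead of x, y)
def pvA_moveBody2 (s : Int × Int × List (Int × Int)) (moves : Char) : Int × Int × List (Int × Int) :=
  let (a, b, coordinates) := s
  if moves = '^' then (a, b + 1, coordinates ++ [(a, b + 1)])
  else if moves = 'v' then (a, b - 1, coordinates ++ [(a, b - 1)])
  else if moves = '>' then (a + 1, b, coordinates ++ [(a + 1, b)])
  else if moves = '<' then (a - 1, b, coordinates ++ [(a - 1, b)])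
  else (a, b, coordinates)

def robo_santa_coordinates (directions : String) : List (Int × Int) :=
  let temps := (PySem.List.pyRange 0 (PySem.Str.len directions) 1).foldl (pvA_splitBody directions) ([], [])
  let s1 := temps.1.foldl pvA_moveBody1 (0, 0, [((0 : Int), (0 : Int))])
  let s2 := temps.2.foldl pvA_moveBody2 (0, 0, s1.2.2)
  PySem.Set.ofList s2.2.2

-- ===== PORT B =====
def pvB_deltas : PySem.Dict Char (Int × Int) :=
  PySem.Dict.ofList [('^', (0, 1)), ('v', (0, -1)), ('>', (1, 0)), ('<', (-1, 0))]

-- body of B's single pass: state = (pos, visits), p = (i, move)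
def pvB_body (s : List (Int × Int) × List (List (Int × Int))) (p : Int × Char) :
    List (Int × Int) × List (List (Int × Int)) :=
  match PySem.Dict.get? pvB_deltas p.2 with
  | none => s
  | some d =>
    let i2 := PySem.Int.mod p.1 2
    let q := PySem.List.pyGetD s.1 i2 (0, 0)
    let np := (q.1 + d.1, q.2 + d.2)
    (PySem.List.pySetD s.1 i2 np,
     PySem.List.pySetD s.2 i2 (PySem.List.pyGetD s.2 i2 [] ++ [np]))

def robo_santa_coordinates_alt (directions : String) : List (Int × Int) :=
  let st := (PySem.List.enumerate directions.toList 0).foldl pvB_body ([(0, 0), (0, 0)], [[], []])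
  PySem.Set.ofList ([(0, 0)] ++ PySem.List.pyGetD st.2 0 [] ++ PySem.List.pyGetD st.2 1 [])

-- ===== PRECONDITION & SPEC =====
def Spec_robo_santa_coordinates (directions : String) (out : List (Int × Int)) : Prop := out = robo_santa_coordinates_alt directions
instance (directions : String) (out : List (Int × Int)) : Decidable (Spec_robo_santa_coordinates directions out) := by unfold Spec_robo_santa_coordinates; infer_instance

-- ===== CLAIM (what is proved, stated in full; the proofs are below) =====
def Claim_equal_robo_santa_coordinates : Prop := ∀ (directions : String), Dom_robo_santa_coordinates directions → Spec_robo_santa_coordinates directions (robo_santa_coordinates directions)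

-- ===== LEMMAS AND PROOFS =====

-- proof-side abstraction: one mover's step on (position, its visited list)
def pvDelta (c : Char) : Option (Int × Int) :=
  if c = '^' then some (0, 1) else if c = 'v' then some (0, -1)
  else if c = '>' then some (1, 0) else if c = '<' then some (-1, 0) else none

def pvStep (s : (Int × Int) × List (Int × Int)) (c : Char) : (Int × Int) × List (Int × Int) :=
  match pvDelta c with
  | none => s
  | some d => ((s.1.1 + d.1, s.1.2 + d.2), s.2 ++ [(s.1.1 + d.1, s.1.2 + d.2)])

-- characters at even / odd positions
def pvSplit : List Char → List Char × List Char
  | [] => ([], [])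
  | c :: cs => (c :: (pvSplit cs).2, (pvSplit cs).1)

lemma pvB_deltas_get (c : Char) : PySem.Dict.get? pvB_deltas c = pvDelta c := by
  by_cases h1 : c = '^'
  · simp_all [pvB_deltas, pvDelta, PySem.Dict.ofList, PySem.Dict.get?, PySem.Dict.update,
      PySem.Dict.insert, PySem.Dict.empty, PySem.Dict.contains]
  · by_cases h2 : c = 'v'
    · simp_all [pvB_deltas, pvDelta, PySem.Dict.ofList, PySem.Dict.get?, PySem.Dict.update,
        PySem.Dict.insert, PySem.Dict.empty, PySem.Dict.contains]
    · by_cases h3 : c = '>'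
      · simp_all [pvB_deltas, pvDelta, PySem.Dict.ofList, PySem.Dict.get?, PySem.Dict.update,
          PySem.Dict.insert, PySem.Dict.empty, PySem.Dict.contains]
      · by_cases h4 : c = '<'
        · simp_all [pvB_deltas, pvDelta, PySem.Dict.ofList, PySem.Dict.get?, PySem.Dict.update,
            PySem.Dict.insert, PySem.Dict.empty, PySem.Dict.contains]
        · simp [pvB_deltas, pvDelta, PySem.Dict.ofList, PySem.Dict.get?, PySem.Dict.update,
            PySem.Dict.insert, PySem.Dict.empty, PySem.Dict.contains, List.find?,
            h1, h2, h3, h4,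
            beq_eq_false_iff_ne.mpr (Ne.symm h1), beq_eq_false_iff_ne.mpr (Ne.symm h2),
            beq_eq_false_iff_ne.mpr (Ne.symm h3), beq_eq_false_iff_ne.mpr (Ne.symm h4)]

-- a parity-dispatching fold over enumerate is two independent folds, one per parity
lemma pv_enum_parity {σ S : Type} (body : S → Int × Char → S) (rep : σ → σ → S)
    (u v : σ → Char → σ)
    (h : ∀ (k : Nat) (a b : σ) (c : Char),
      body (rep a b) ((k : Int), c) = if k % 2 = 0 then rep (u a c) b else rep a (v b c)) :
    ∀ (l : List Char) (n : Nat) (a b : σ),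
      (PySem.List.enumerate l (n : Int)).foldl body (rep a b) =
        if n % 2 = 0 then rep ((pvSplit l).1.foldl u a) ((pvSplit l).2.foldl v b)
        else rep ((pvSplit l).2.foldl u a) ((pvSplit l).1.foldl v b) := by
  intro l
  induction l with
  | nil => intro n a b; simp [PySem.List.enumerate_nil, pvSplit]
  | cons c cs ih =>
    intro n a b
    rw [PySem.List.enumerate_cons]
    have hcast : (n : Int) + 1 = ((n + 1 : Nat) : Int) := by push_cast; ring
    simp only [List.foldl_cons]
    rcases Nat.even_or_odd n with he | ho
    · have h0 : n % 2 = 0 := Nat.even_iff.mp he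
      rw [h n a b c, if_pos h0, hcast, ih (n + 1) (u a c) b, if_neg (by omega), if_pos h0]
      simp [pvSplit]
    · have h0 : n % 2 = 1 := Nat.odd_iff.mp ho
      rw [h n a b c, if_neg (by omega), hcast, ih (n + 1) a (v b c), if_pos (by omega),
        if_neg (by omega)]
      simp [pvSplit]

-- A's index/parity split loop computes exactly pvSplit of the character list
lemma pvA_split_eq (directions : String) :
    (PySem.List.pyRange 0 (PySem.Str.len directions) 1).foldl (pvA_splitBody directions) ([], []) =
      pvSplit directions.toList := by
  have hb : ∀ (t : List Char × List Char) (i : Int),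
      pvA_splitBody directions t i =
        (fun (t : List Char × List Char) (p : Int × Char) =>
          if PySem.Int.mod p.1 2 == 0 then (t.1 ++ [p.2], t.2) else (t.1, t.2 ++ [p.2]))
          t (i, PySem.List.pyGetD directions.toList i ' ') := by
    intro t i
    simp [pvA_splitBody, PySem.List.pyGetD, PySem.Str.pyGet?]
  have hlen : PySem.Str.len directions = PySem.List.len directions.toList := by
    simp [PySem.Str.len, PySem.List.len]
  rw [hlen]
  calc (PySem.List.pyRange 0 (PySem.List.len directions.toList) 1).foldl (pvA_splitBody directions) ([], [])
      = (PySem.List.pyRange 0 (PySem.List.len directions.toList) 1).foldl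
          (fun t i => (fun (t : List Char × List Char) (p : Int × Char) =>
            if PySem.Int.mod p.1 2 == 0 then (t.1 ++ [p.2], t.2) else (t.1, t.2 ++ [p.2]))
            t (i, PySem.List.pyGetD directions.toList i ' ')) ([], []) := by
        exact PySem.List.foldl_congr_mem _ _ _ _ (fun t i _ => hb t i)
    _ = ((PySem.List.pyRange 0 (PySem.List.len directions.toList) 1).map
          (fun j => (j, PySem.List.pyGetD directions.toList j ' '))).foldl
          (fun (t : List Char × List Char) (p : Int × Char) =>
            if PySem.Int.mod p.1 2 == 0 then (t.1 ++ [p.2], t.2) else (t.1, t.2 ++ [p.2])) ([], []) := by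
        rw [List.foldl_map]
    _ = (PySem.List.enumerate directions.toList 0).foldl
          (fun (t : List Char × List Char) (p : Int × Char) =>
            if PySem.Int.mod p.1 2 == 0 then (t.1 ++ [p.2], t.2) else (t.1, t.2 ++ [p.2])) ([], []) := by
        rw [PySem.List.enumerate_eq_map_pyRange directions.toList ' ']
    _ = pvSplit directions.toList := by
        have hmain := pv_enum_parity
          (body := fun (t : List Char × List Char) (p : Int × Char) =>
            if PySem.Int.mod p.1 2 == 0 then (t.1 ++ [p.2], t.2) else (t.1, t.2 ++ [p.2]))
          (rep := fun a b => (a, b)) (u := fun a c => a ++ [c]) (v := fun b c => b ++ [c])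
          (by intro k a b c
              have hm : PySem.Int.mod (k : Int) 2 = ((k % 2 : Nat) : Int) := by
                exact_mod_cast PySem.Int.mod_natCast k 2
              simp only [hm]
              rcases Nat.even_or_odd k with he | ho
              · have h0 : k % 2 = 0 := Nat.even_iff.mp he; simp [h0]
              · have h0 : k % 2 = 1 := Nat.odd_iff.mp ho; simp [h0])
          directions.toList 0 [] []
        rw [Nat.cast_zero] at hmain
        rw [hmain]
        simp only [Nat.zero_mod, PySem.List.foldl_append_singleton, List.nil_append]
        simp

-- visits accumulate on the left of a pvStep run
lemma pvStep_shift (l : List Char) : ∀ (p : Int × Int) (vs : List (Int × Int)),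
    l.foldl pvStep (p, vs) =
      ((l.foldl pvStep (p, [])).1, vs ++ (l.foldl pvStep (p, [])).2) := by
  induction l with
  | nil => intro p vs; simp
  | cons c cs ih =>
    intro p vs
    simp only [List.foldl_cons]
    rcases hd : pvDelta c with _ | d
    · simp only [pvStep, hd]; exact ih p vs
    · simp only [pvStep, hd]
      rw [ih (p.1 + d.1, p.2 + d.2) (vs ++ [(p.1 + d.1, p.2 + d.2)])]
      conv_rhs => rw [ih (p.1 + d.1, p.2 + d.2) ([] ++ [(p.1 + d.1, p.2 + d.2)])]
      simp

-- one character of A's move loop is one pvStep, threading the shared accumulator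
lemma pvA_body1_step (x y : Int) (acc : List (Int × Int)) (c : Char) :
    pvA_moveBody1 (x, y, acc) c =
      ((pvStep ((x, y), []) c).1.1, (pvStep ((x, y), []) c).1.2,
        acc ++ (pvStep ((x, y), []) c).2) := by
  by_cases h1 : c = '^' <;> by_cases h2 : c = 'v' <;> by_cases h3 : c = '>' <;>
    by_cases h4 : c = '<' <;> simp_all [pvA_moveBody1, pvStep, pvDelta, sub_eq_add_neg]

lemma pvA_body2_step (x y : Int) (acc : List (Int × Int)) (c : Char) :
    pvA_moveBody2 (x, y, acc) c =
      ((pvStep ((x, y), []) c).1.1, (pvStep ((x, y), []) c).1.2,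
        acc ++ (pvStep ((x, y), []) c).2) := by
  by_cases h1 : c = '^' <;> by_cases h2 : c = 'v' <;> by_cases h3 : c = '>' <;>
    by_cases h4 : c = '<' <;> simp_all [pvA_moveBody2, pvStep, pvDelta, sub_eq_add_neg]

-- A's move loop is one mover's pvStep run, threading the shared coordinates accumulator
lemma pvA_move1_eq (l : List Char) : ∀ (x y : Int) (acc : List (Int × Int)),
    l.foldl pvA_moveBody1 (x, y, acc) =
      ((l.foldl pvStep ((x, y), [])).1.1, (l.foldl pvStep ((x, y), [])).1.2,
        acc ++ (l.foldl pvStep ((x, y), [])).2) := by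
  induction l with
  | nil => intro x y acc; simp
  | cons c cs ih =>
    intro x y acc
    simp only [List.foldl_cons, pvA_body1_step]
    rw [ih]
    have hs := pvStep_shift cs (pvStep ((x, y), []) c).1 (pvStep ((x, y), []) c).2
    rw [show (((pvStep ((x, y), []) c).1, (pvStep ((x, y), []) c).2)) = pvStep ((x, y), []) c
      from rfl] at hs
    rw [hs]
    simp

lemma pvA_move2_eq (l : List Char) : ∀ (x y : Int) (acc : List (Int × Int)),
    l.foldl pvA_moveBody2 (x, y, acc) =
      ((l.foldl pvStep ((x, y), [])).1.1, (l.foldl pvStep ((x, y), [])).1.2,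
        acc ++ (l.foldl pvStep ((x, y), [])).2) := by
  induction l with
  | nil => intro x y acc; simp
  | cons c cs ih =>
    intro x y acc
    simp only [List.foldl_cons, pvA_body2_step]
    rw [ih]
    have hs := pvStep_shift cs (pvStep ((x, y), []) c).1 (pvStep ((x, y), []) c).2
    rw [show (((pvStep ((x, y), []) c).1, (pvStep ((x, y), []) c).2)) = pvStep ((x, y), []) c
      from rfl] at hs
    rw [hs]
    simp

-- B's loop body dispatches one pvStep to the mover selected by the index's parity
lemma pvB_body_parity (k : Nat) (a b : (Int × Int) × List (Int × Int)) (c : Char) :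
    pvB_body ([a.1, b.1], [a.2, b.2]) ((k : Int), c) =
      if k % 2 = 0 then ([(pvStep a c).1, b.1], [(pvStep a c).2, b.2])
      else ([a.1, (pvStep b c).1], [a.2, (pvStep b c).2]) := by
  simp only [pvB_body, pvB_deltas_get]
  rcases hd : pvDelta c with _ | d
  · simp only [pvStep, hd]; split <;> rfl
  · have hm : PySem.Int.mod (k : Int) 2 = ((k % 2 : Nat) : Int) := by
      exact_mod_cast PySem.Int.mod_natCast k 2
    simp only [pvStep, hd, hm]
    rcases Nat.even_or_odd k with he | ho
    · have h0 : k % 2 = 0 := Nat.even_iff.mp he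
      rw [if_pos h0, h0]
      simp [PySem.List.pyGetD, PySem.List.pyGet?, PySem.List.pyIdx?,
        PySem.List.pySetD, PySem.List.pySet?]
    · have h0 : k % 2 = 1 := Nat.odd_iff.mp ho
      rw [if_neg (by omega), h0]
      simp [PySem.List.pyGetD, PySem.List.pyGet?, PySem.List.pyIdx?,
        PySem.List.pySetD, PySem.List.pySet?]

-- ===== VERDICT (by name: the statement is the Claim_ definition above) =====
theorem robo_santa_coordinates_spec : Claim_equal_robo_santa_coordinates := by
  intro directions _
  unfold Spec_robo_santa_coordinates robo_santa_coordinates robo_santa_coordinates_alt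
  rw [pvA_split_eq]
  have hE := pvA_move1_eq (pvSplit directions.toList).1 0 0 [((0 : Int), (0 : Int))]
  have hO := pvA_move2_eq (pvSplit directions.toList).2
  have hB := pv_enum_parity pvB_body
    (rep := fun a b => ([a.1, b.1], [a.2, b.2])) (u := pvStep) (v := pvStep)
    pvB_body_parity directions.toList 0 ((0, 0), []) ((0, 0), [])
  rw [Nat.cast_zero] at hB
  rw [Nat.zero_mod, if_pos rfl] at hB
  simp only []
  rw [hE]
  rw [hO]
  rw [show (([((0:Int),(0:Int)), ((0:Int),(0:Int))], [([] : List (Int × Int)), ([] : List (Int × Int))])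
        = ((fun (a b : (Int × Int) × List (Int × Int)) => ([a.1, b.1], [a.2, b.2]))
            (((0 : Int), (0 : Int)), ([] : List (Int × Int))) (((0 : Int), (0 : Int)), ([] : List (Int × Int))))) from rfl]
  rw [hB]
  simp [PySem.List.pyGetD, PySem.List.pyGet?, PySem.List.pyIdx?]
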